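-- pv_equiv track=rewrite | github.com/BriArl/Intro-to-Python-TestPrep | answers/6.14.py | reverse_binary_representation
-- ===== SOURCE A (Python) =====
-- def reverse_binary_representation(x):
--     if x <= 0:
--         return "Input must be a pos integer"
--     result = ""
--     while x > 0:
--         result += str(x % 2) # Append the remainder of x divded by 2 (0 or 1)
--         x //= 2 # Update x to be x divded by 2 (int division)
--
--     return result
-- ===== SOURCE B (Python) =====
-- def reverse_binary_representation(x):
--     if x <= 0:
--         return "Input must be a pos integer"
--     return bin(x)[2:][::-1]
-- ===== Notes on version B (the rewrite author's own statement) =====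
-- stated objective: idiomatic
-- what changed: Replaces the manual remainder/division loop with the builtin bin() formatter plus a slice reversal (bin is MSB-first, the loop emits LSB-first, so reversing matches exactly).
import Mathlib
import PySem

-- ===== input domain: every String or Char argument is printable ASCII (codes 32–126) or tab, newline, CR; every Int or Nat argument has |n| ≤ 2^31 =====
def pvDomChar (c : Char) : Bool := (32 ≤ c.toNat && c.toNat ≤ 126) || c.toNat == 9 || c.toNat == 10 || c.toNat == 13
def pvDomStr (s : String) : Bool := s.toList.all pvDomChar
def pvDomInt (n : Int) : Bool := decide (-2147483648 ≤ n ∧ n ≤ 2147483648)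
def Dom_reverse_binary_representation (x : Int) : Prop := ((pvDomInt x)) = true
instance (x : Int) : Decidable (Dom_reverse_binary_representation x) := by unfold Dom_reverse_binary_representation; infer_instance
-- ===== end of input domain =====

-- B replaces A's manual remainder/division loop with bin(x)[2:][::-1]: the builtin binary formatter plus a slice reversal (idiomatic, same cost).


-- ===== PORT A =====
-- the 'while x > 0' loop of A, carried state (x, result)
def revbinLoop (x : Int) (result : String) : String :=
  if _h : 0 < x then
    revbinLoop (PySem.Int.floordiv x 2) (result ++ PySem.Int.toStr (PySem.Int.mod x 2))
  else result
termination_by x.toNat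
decreasing_by
  rw [PySem.Int.floordiv_eq_ediv_of_pos (by omega : (0:Int) < 2)]
  omega

def reverse_binary_representation (x : Int) : String :=
  if x ≤ 0 then "Input must be a pos integer"
  else revbinLoop x ""

-- ===== PORT B =====
def reverse_binary_representation_alt (x : Int) : String :=
  if x ≤ 0 then "Input must be a pos integer"
  else
    -- bin(x)[2:][::-1]; [::-1] with step -1 never raises, so getD's default is never used
    let t := PySem.Str.slice (PySem.Int.pyBin x) (some 2) none
    (PySem.Str.slice? t none none (-1)).getD t

-- ===== PRECONDITION & SPEC =====
def Spec_reverse_binary_representation (x : Int) (out : String) : Prop := out = reverse_binary_representation_alt x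
instance (x : Int) (out : String) : Decidable (Spec_reverse_binary_representation x out) := by unfold Spec_reverse_binary_representation; infer_instance

-- ===== CLAIM (what is proved, stated in full; the proofs are below) =====
def Claim_equal_reverse_binary_representation : Prop := ∀ (x : Int), Dom_reverse_binary_representation x → Spec_reverse_binary_representation x (reverse_binary_representation x)

-- ===== LEMMAS AND PROOFS =====

theorem toDigitsCore_acc (b f : Nat) : ∀ (n : Nat) (acc : List Char),
    Nat.toDigitsCore b f n acc = Nat.toDigitsCore b f n [] ++ acc := by
  induction f with
  | zero => intro n acc; simp [Nat.toDigitsCore]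
  | succ f ih =>
    intro n acc
    rw [Nat.toDigitsCore, Nat.toDigitsCore]
    by_cases h : n / b = 0
    · simp [h]
    · simp only [h, if_false]
      rw [ih (n / b) ((n % b).digitChar :: acc), ih (n / b) [(n % b).digitChar]]
      simp

theorem toDigitsCore_fuel (f : Nat) : ∀ (f' n : Nat), n < f → n < f' →
    ∀ acc, Nat.toDigitsCore 2 f n acc = Nat.toDigitsCore 2 f' n acc := by
  induction f with
  | zero => intro f' n h; omega
  | succ f ih =>
    intro f' n h h' acc
    cases f' with
    | zero => omega
    | succ f' =>
      rw [Nat.toDigitsCore, Nat.toDigitsCore]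
      by_cases h2 : n / 2 = 0
      · simp [h2]
      · simp only [h2, if_false]
        exact ih f' (n / 2) (by omega) (by omega) _

theorem toDigits_two_step (n : Nat) (h : 2 ≤ n) :
    Nat.toDigits 2 n = Nat.toDigits 2 (n / 2) ++ [Nat.digitChar (n % 2)] := by
  unfold Nat.toDigits
  rw [Nat.toDigitsCore]
  have h2 : ¬ (n / 2 = 0) := by omega
  simp only [h2, if_false]
  rw [toDigitsCore_acc, toDigitsCore_fuel n (n / 2 + 1) (n / 2) (by omega) (by omega)]

theorem ofList_cons_append (c : Char) (l : List Char) :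
    String.ofList [c] ++ String.ofList l = String.ofList (c :: l) := by
  apply String.ext
  simp

theorem revbinLoop_eq (n : Nat) (h : 0 < n) : ∀ acc : String,
    revbinLoop (n : Int) acc = acc ++ String.ofList ((Nat.toDigits 2 n).reverse) := by
  induction n using Nat.strong_induction_on with
  | _ n ih =>
    intro acc
    rw [revbinLoop]
    have hpos : (0 : Int) < (n : Int) := by exact_mod_cast h
    simp only [hpos, dite_true]
    have hfd : PySem.Int.floordiv (n : Int) 2 = ((n / 2 : Nat) : Int) := by
      exact_mod_cast PySem.Int.floordiv_natCast n 2
    have hmd : PySem.Int.mod (n : Int) 2 = ((n % 2 : Nat) : Int) := by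
      exact_mod_cast PySem.Int.mod_natCast n 2
    rw [hfd, hmd]
    by_cases h1 : n = 1
    · subst h1
      rw [revbinLoop]
      norm_num
      rfl
    · have h2 : 2 ≤ n := by omega
      rw [ih (n / 2) (by omega) (by omega), toDigits_two_step n h2]
      rw [String.append_assoc]
      congr 1
      have hd : PySem.Int.toStr ((n % 2 : Nat) : Int) = String.ofList [Nat.digitChar (n % 2)] := by
        rcases Nat.mod_two_eq_zero_or_one n with h0 | h0 <;> rw [h0] <;> rfl
      rw [hd, ofList_cons_append]
      simp

-- ===== VERDICT (by name: the statement is the Claim_ definition above) =====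
theorem reverse_binary_representation_spec : Claim_equal_reverse_binary_representation := by
  intro x _
  unfold Spec_reverse_binary_representation reverse_binary_representation reverse_binary_representation_alt
  by_cases hx : x ≤ 0
  · simp [hx]
  · simp only [hx, if_false]
    have hcast : x = ((x.toNat : Nat) : Int) := by omega
    rw [hcast, revbinLoop_eq x.toNat (by omega), String.empty_append]
    have ht : (PySem.Str.slice (PySem.Int.pyBin ((x.toNat : Nat) : Int)) (some 2) none).toList
        = Nat.toDigits 2 x.toNat := by
      rw [PySem.Str.toList_slice, PySem.Chars.slice_eq_listSlice, PySem.Int.toList_pyBin]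
      have hneg : ¬ (((x.toNat : Nat) : Int) < 0) := by omega
      simp only [PySem.Int.toBinChars0b, hneg, if_false]
      rw [show ((2:Int)) = ((2:Nat):Int) from rfl, PySem.List.slice_from_natCast]
      simp only [Int.toNat_natCast, List.drop_succ_cons, List.drop_zero]
    simp only [PySem.Str.slice?_none_none_neg_one, Option.getD_some, ht]
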